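-- pv_equiv track=rewrite | github.com/pypi-data/pypi-mirror-35 | packages/buf/buf-1.0.0a9.tar.gz/buf-1.0.0a9/buf/unit.py | split_unit_quantity
-- ===== SOURCE A (Python) =====
-- def split_unit_quantity(string):
--     """Given a physical quantity as a string, returns a tuple containing the quantity's magnitude and unit, both
--     as strings."""
--     quantity = ""
--     index = 0
--     quantity_characters = [str(num) for num in range(10)] + [".", "-", "+"]
--     for character in string:
--         if character in quantity_characters:
--             quantity+= character
--             index += 1
--         else:
--             break
--     symbol = string[index:]
--     return quantity, symbol
-- ===== SOURCE B (Python) =====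
-- import re
--
-- _QUANTITY_PREFIX = re.compile(r'[0-9.+-]*')
--
-- def split_unit_quantity(string):
--     """Given a physical quantity as a string, returns a tuple containing the quantity's magnitude and unit, both
--     as strings."""
--     m = _QUANTITY_PREFIX.match(string)
--     return m.group(), string[m.end():]
-- ===== Notes on version B (the rewrite author's own statement) =====
-- stated objective: idiomatic
-- what changed: The hand-written accumulation loop with a character list and a manual index counter is replaced by a single regular-expression match of the maximal [0-9.+-]* prefix; the regex engine does the scan and no quantity string or index is maintained by hand.
import Mathlib
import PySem

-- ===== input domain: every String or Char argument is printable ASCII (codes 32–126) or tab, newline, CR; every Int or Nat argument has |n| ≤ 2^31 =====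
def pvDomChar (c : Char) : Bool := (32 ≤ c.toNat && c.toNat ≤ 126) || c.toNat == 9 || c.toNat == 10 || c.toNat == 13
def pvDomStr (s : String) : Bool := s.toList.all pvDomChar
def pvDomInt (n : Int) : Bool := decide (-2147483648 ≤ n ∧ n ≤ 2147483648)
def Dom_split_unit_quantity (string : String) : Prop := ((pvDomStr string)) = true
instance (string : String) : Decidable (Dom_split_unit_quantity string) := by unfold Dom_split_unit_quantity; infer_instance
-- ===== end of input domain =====

-- B replaces A's manual accumulate-and-count loop by taking the maximal [0-9.+-]* prefix in one split (idiomatic).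

-- ===== PORT A =====
-- quantity_characters = [str(num) for num in range(10)] + [".", "-", "+"]
def pvQuantityChars : List String :=
  (PySem.List.pyRange 0 10 1).map PySem.Int.toStr ++ [".", "-", "+"]

-- the for-loop with break: carries (quantity, index); stops at the first non-member character
def pvLoopA : List Char → List Char → Nat → List Char × Nat
  | [], quantity, index => (quantity, index)
  | c :: rest, quantity, index =>
      if String.ofList [c] ∈ pvQuantityChars then pvLoopA rest (quantity ++ [c]) (index + 1)
      else (quantity, index)

def split_unit_quantity (string : String) : String × String :=
  let r := pvLoopA string.toList [] 0
  -- symbol = string[index:]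
  (String.ofList r.1, String.ofList (PySem.List.slice string.toList (some (r.2 : Int)) none))

-- ===== PORT B =====
-- the regex character class [0-9.+-]
def pvIsQuantityChar (c : Char) : Bool := ('0' ≤ c && c ≤ '9') || c == '.' || c == '+' || c == '-'

def split_unit_quantity_alt (string : String) : String × String :=
  -- re.match(r'[0-9.+-]*', s).group() is the maximal prefix of class characters, the rest follows it
  (String.ofList (string.toList.takeWhile pvIsQuantityChar),
   String.ofList (string.toList.dropWhile pvIsQuantityChar))

-- ===== PRECONDITION & SPEC =====
def Spec_split_unit_quantity (string : String) (out : String × String) : Prop := out = split_unit_quantity_alt string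
instance (string : String) (out : String × String) : Decidable (Spec_split_unit_quantity string out) := by unfold Spec_split_unit_quantity; infer_instance

-- ===== CLAIM (what is proved, stated in full; the proofs are below) =====
def Claim_equal_split_unit_quantity : Prop := ∀ (string : String), Dom_split_unit_quantity string → Spec_split_unit_quantity string (split_unit_quantity string)

-- ===== LEMMAS AND PROOFS =====

-- membership in A's list of quantity characters coincides with B's character class
lemma mem_pvQuantityChars (c : Char) :
    (String.ofList [c] ∈ pvQuantityChars) ↔ pvIsQuantityChar c = true := by
  have hq : pvQuantityChars = ["0","1","2","3","4","5","6","7","8","9",".","-","+"] := by decide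
  have hinj : ∀ d : Char, (String.ofList [c] = String.ofList [d]) ↔ c = d := by
    intro d
    constructor
    · intro h
      have := congrArg String.toList h
      simpa using this
    · intro h; subst h; rfl
  rw [hq]
  simp only [List.mem_cons, List.not_mem_nil, or_false,
    show ("0" : String) = String.ofList ['0'] from rfl, show ("1" : String) = String.ofList ['1'] from rfl,
    show ("2" : String) = String.ofList ['2'] from rfl, show ("3" : String) = String.ofList ['3'] from rfl,
    show ("4" : String) = String.ofList ['4'] from rfl, show ("5" : String) = String.ofList ['5'] from rfl,
    show ("6" : String) = String.ofList ['6'] from rfl, show ("7" : String) = String.ofList ['7'] from rfl,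
    show ("8" : String) = String.ofList ['8'] from rfl, show ("9" : String) = String.ofList ['9'] from rfl,
    show ("." : String) = String.ofList ['.'] from rfl, show ("-" : String) = String.ofList ['-'] from rfl,
    show ("+" : String) = String.ofList ['+'] from rfl, hinj]
  unfold pvIsQuantityChar
  simp only [Bool.or_eq_true, Bool.and_eq_true, decide_eq_true_eq, beq_iff_eq,
    Char.le_def, Char.ext_iff, UInt32.le_iff_toNat_le, ← UInt32.toNat_inj]
  simp only [show ('0' : Char).val.toNat = 48 from rfl, show ('1' : Char).val.toNat = 49 from rfl,
    show ('2' : Char).val.toNat = 50 from rfl, show ('3' : Char).val.toNat = 51 from rfl,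
    show ('4' : Char).val.toNat = 52 from rfl, show ('5' : Char).val.toNat = 53 from rfl,
    show ('6' : Char).val.toNat = 54 from rfl, show ('7' : Char).val.toNat = 55 from rfl,
    show ('8' : Char).val.toNat = 56 from rfl, show ('9' : Char).val.toNat = 57 from rfl,
    show ('.' : Char).val.toNat = 46 from rfl, show ('-' : Char).val.toNat = 45 from rfl,
    show ('+' : Char).val.toNat = 43 from rfl]
  omega

-- dropping the matched prefix leaves exactly the dropWhile remainder
lemma pv_drop_length_takeWhile (p : Char → Bool) (l : List Char) :
    l.drop (l.takeWhile p).length = l.dropWhile p := by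
  induction l with
  | nil => rfl
  | cons a l ih =>
      by_cases h : p a <;> simp [List.takeWhile_cons, h, ih]

-- A's loop accumulates exactly the takeWhile prefix and counts its length
lemma pvLoopA_eq (cs : List Char) : ∀ (q : List Char) (i : Nat),
    pvLoopA cs q i = (q ++ cs.takeWhile pvIsQuantityChar, i + (cs.takeWhile pvIsQuantityChar).length) := by
  induction cs with
  | nil => intro q i; simp [pvLoopA]
  | cons c rest ih =>
      intro q i
      by_cases h : pvIsQuantityChar c = true
      · rw [pvLoopA, if_pos ((mem_pvQuantityChars c).mpr h), ih]
        simp [h]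
        omega
      · rw [pvLoopA, if_neg (fun hm => h ((mem_pvQuantityChars c).mp hm))]
        simp [Bool.eq_false_iff.mpr h]

-- ===== VERDICT (by name: the statement is the Claim_ definition above) =====
theorem split_unit_quantity_spec : Claim_equal_split_unit_quantity := by
  intro s _
  unfold Spec_split_unit_quantity split_unit_quantity split_unit_quantity_alt
  rw [pvLoopA_eq]
  simp only [List.nil_append, Nat.zero_add, Prod.mk.injEq]
  refine ⟨trivial, ?_⟩
  rw [PySem.List.slice_from s.toList (by positivity), Int.toNat_natCast,
    pv_drop_length_takeWhile]
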